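-- pv_equiv track=rewrite | github.com/JamesMCo/Advent-Of-Code | 2017/10/Part2.py | solve
-- ===== SOURCE A (Python) =====
-- def rotate(l, n):
--     t = [x for x in l]
--     if len(t) <= 1:
--         return t
--     if len(t) == 2:
--         return t[1] + t[0]
--     for i in range(n):
--         t = t[1:] + [t[0]]
--     return t
--
-- def solve(puzzle_input):
--     puzzle_input = [ord(x) for x in puzzle_input] + [17,31,73,47,23]
--     l = [x for x in range(256)]
--     skip_size = 0
--     total_rotations = 0
--
--     for j in range(64):
--         for i in puzzle_input:
--             if i <= 256:
--                 l = l[i-1::-1] + l[i:]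
--             else:
--                 l = l[::-1]
--             l = rotate(l, i + skip_size)
--             total_rotations += i + skip_size
--             skip_size += 1
--
--     l = rotate(l, 256 - (total_rotations % 256))
--
--     output = [0,0,0,0,0,0,0,0,0,0,0,0,0,0,0,0]
--     for i in range(256):
--         if i % 16 == 0:
--             output[int(i / 16)] = l[i]
--         else:
--             output[int(i / 16)] ^= l[i]
--         i += 1
--     return "".join(hex(x)[2:].zfill(2) for x in output)
-- ===== SOURCE B (Python) =====
-- def solve(puzzle_input):
--     lengths = [ord(c) for c in puzzle_input] + [17, 31, 73, 47, 23]
--     n = 256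
--     l = list(range(n))
--     pos = 0
--     skip = 0
--     for _ in range(64):
--         for i in lengths:
--             # reverse the circular span of i elements starting at pos, by direct indexing
--             l = [l[(2 * pos + i - 1 - j) % n] if (j - pos) % n < i else l[j]
--                  for j in range(n)]
--             pos = (pos + i + skip) % n
--             skip += 1
--     out = []
--     for b in range(16):
--         x = 0
--         for j in range(16):
--             x ^= l[16 * b + j]
--         out.append(x)
--     return "".join("%02x" % x for x in out)
-- ===== Notes on version B (the rewrite author's own statement) =====
-- stated objective: faster
-- what changed: B keeps the knot-hash list in true order with an explicit position pointer and reverses each circular span by direct modular indexing (no final un-rotation), instead of A's reverse-prefix then rotate-one-element-at-a-time; the dense hash is 16 nested xor loops instead of an index-arithmetic fold with in-place assignment.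
import Mathlib
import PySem

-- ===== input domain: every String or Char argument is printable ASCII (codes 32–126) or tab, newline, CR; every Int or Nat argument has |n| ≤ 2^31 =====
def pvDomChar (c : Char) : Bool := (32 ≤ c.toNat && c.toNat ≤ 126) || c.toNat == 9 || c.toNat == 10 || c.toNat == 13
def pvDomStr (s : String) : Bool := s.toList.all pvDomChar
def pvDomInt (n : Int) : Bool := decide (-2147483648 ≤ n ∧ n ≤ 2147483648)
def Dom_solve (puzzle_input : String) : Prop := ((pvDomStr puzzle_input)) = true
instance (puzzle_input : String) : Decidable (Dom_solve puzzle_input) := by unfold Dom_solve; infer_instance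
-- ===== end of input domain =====

-- B replaces A's rotate-the-whole-list knot hash (reverse a prefix, then rotate the list
-- one element at a time, undoing all rotations at the end) by the standard pointer version:
-- the list stays in true order and each length reverses a circular span at a moving position,
-- computed by direct modular indexing.  Objective: faster (no per-step O(rotations) loop).

-- ===== PORT A =====
-- helper `rotate` of A.  The len == 2 branch returns t[1] + t[0] in Python — an int, not a
-- list (a TypeError downstream); it is unreachable from solve (the list always has 256
-- elements) and is ported as the singleton [t[1] + t[0]] to stay typed.
def rotateA (l : List Int) (n : Int) : List Int :=
  let t := l.map (fun x => x)
  if t.length ≤ 1 then t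
  else if t.length = 2 then [PySem.List.pyGetD t 1 0 + PySem.List.pyGetD t 0 0]
  else (PySem.List.pyRange 0 n 1).foldl
        (fun t _ => PySem.List.slice t (some 1) none ++ [PySem.List.pyGetD t 0 0]) t

-- body of A's inner loop over the lengths; state = (l, skip_size, total_rotations)
def stepA (st : List Int × Int × Int) (i : Int) : List Int × Int × Int :=
  let l := st.1
  let skip := st.2.1
  let tot := st.2.2
  let l1 := if i ≤ 256 then
      (PySem.List.slice? l (some (i - 1)) none (-1)).getD [] ++ PySem.List.slice l (some i) none
    else (PySem.List.slice? l none none (-1)).getD []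
  let l2 := rotateA l1 (i + skip)
  (l2, skip + 1, tot + (i + skip))

-- hex(x)[2:].zfill(2) (also "%02x" % x); exact for 0 ≤ x
def hexPad2 (x : Int) : List Char :=
  let ds := Nat.toDigits 16 x.toNat
  List.replicate (2 - ds.length) '0' ++ ds

-- A's output loop; int(i / 16) is exact float division for 0 ≤ i < 256, = i // 16 = truncdiv
def hashA (l : List Int) : List Int :=
  (PySem.List.pyRange 0 256 1).foldl (fun out i =>
    if PySem.Int.mod i 16 = 0 then
      PySem.List.pySetD out (PySem.Int.truncdiv i 16) (PySem.List.pyGetD l i 0)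
    else
      PySem.List.pySetD out (PySem.Int.truncdiv i 16)
        (PySem.Int.bxor (PySem.List.pyGetD out (PySem.Int.truncdiv i 16) 0)
          (PySem.List.pyGetD l i 0)))
    [0,0,0,0,0,0,0,0,0,0,0,0,0,0,0,0]

def solve (puzzle_input : String) : String :=
  let pin : List Int := puzzle_input.toList.map (fun c => ((c.toNat : Int))) ++ [17,31,73,47,23]
  let st := (PySem.List.pyRange 0 64 1).foldl (fun st _ => pin.foldl stepA st)
      ((PySem.List.pyRange 0 256 1).map (fun x => x), 0, 0)
  let l := rotateA st.1 (256 - PySem.Int.mod st.2.2 256)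
  String.ofList ((hashA l).flatMap hexPad2)

-- ===== PORT B =====
-- body of B's inner loop; state = (l, pos, skip)
def stepB (st : List Int × Int × Int) (i : Int) : List Int × Int × Int :=
  let l := st.1
  let pos := st.2.1
  let skip := st.2.2
  let l1 := (PySem.List.pyRange 0 256 1).map (fun j =>
    if PySem.Int.mod (j - pos) 256 < i then
      PySem.List.pyGetD l (PySem.Int.mod (2 * pos + i - 1 - j) 256) 0
    else PySem.List.pyGetD l j 0)
  (l1, PySem.Int.mod (pos + i + skip) 256, skip + 1)

-- B's dense-hash loops
def hashB (l : List Int) : List Int :=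
  (PySem.List.pyRange 0 16 1).foldl (fun out b =>
    out ++ [(PySem.List.pyRange 0 16 1).foldl
      (fun x j => PySem.Int.bxor x (PySem.List.pyGetD l (16 * b + j) 0)) 0]) []

def solve_alt (puzzle_input : String) : String :=
  let lengths : List Int := puzzle_input.toList.map (fun c => ((c.toNat : Int))) ++ [17,31,73,47,23]
  let st := (PySem.List.pyRange 0 64 1).foldl (fun st _ => lengths.foldl stepB st)
      (PySem.List.pyRange 0 256 1, 0, 0)
  String.ofList ((hashB st.1).flatMap hexPad2)

-- ===== PRECONDITION & SPEC =====
def Spec_solve (puzzle_input : String) (out : String) : Prop := out = solve_alt puzzle_input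
instance (puzzle_input : String) (out : String) : Decidable (Spec_solve puzzle_input out) := by unfold Spec_solve; infer_instance

-- ===== CLAIM (what is proved, stated in full; the proofs are below) =====
def Claim_equal_solve : Prop := ∀ (puzzle_input : String), Dom_solve puzzle_input → Spec_solve puzzle_input (solve puzzle_input)

-- ===== LEMMAS AND PROOFS =====

-- invariant tying A's state (l, skip, total) to B's state (l, pos, skip):
-- A's list is B's list rotated left by pos, pos = total % 256, skips agree
def KnotRel (stA stB : List Int × Int × Int) : Prop :=
  stB.1.length = 256 ∧ 0 ≤ stB.2.1 ∧ stB.2.1 < 256 ∧ 0 ≤ stA.2.1 ∧ 0 ≤ stA.2.2 ∧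
  stA.2.1 = stB.2.2 ∧ stB.2.1 = PySem.Int.mod stA.2.2 256 ∧
  stA.1 = stB.1.rotate stB.2.1.toNat

theorem map_range_rev (xs : List Int) (m : Nat) (hm : m ≤ xs.length) :
    (List.range m).map (fun k => xs.getD (m - 1 - k) 0) = (xs.take m).reverse := by
  apply List.ext_getElem
  · simp [Nat.min_eq_left hm]
  · intro k h1 h2
    simp only [List.length_map, List.length_range] at h1
    have ht : (List.take m xs).length = m := by simp [Nat.min_eq_left hm]
    simp only [List.getElem_map, List.getElem_range, List.getElem_reverse, List.getElem_take, ht]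
    rw [List.getD_eq_getElem _ _ (by omega)]

theorem slice_rev (xs : List Int) (i : Int) (h1 : 1 ≤ i) (h2 : i ≤ (xs.length : Int)) :
    (PySem.List.slice? xs (some (i - 1)) none (-1)).getD [] = (xs.take i.toNat).reverse := by
  unfold PySem.List.slice? PySem.List.sliceIndices
  simp only [if_neg (by norm_num : ¬((-1 : Int) = 0)), if_pos (by norm_num : ((-1:Int) < 0)),
    if_neg (by omega : ¬ (i - 1 < 0)), if_neg (by norm_num : ¬(0 < (-1:Int))),
    if_pos (by omega : (-1:Int) < min (i - 1) ((xs.length:Int) - 1))]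
  rw [show min (i - 1) ((xs.length:Int) - 1) = i - 1 from by omega]
  rw [show ((i - 1 - -1 + - -1 - 1) / - -1) = i from by norm_num]
  rw [Option.getD_some, ← map_range_rev xs i.toNat (by omega)]
  rw [← List.filterMap_eq_map]
  apply List.filterMap_congr
  intro k hk
  rw [List.mem_range] at hk
  rw [show (i - 1 + -1 * (k:Int)).toNat = i.toNat - 1 - k from by omega]
  simp only [Function.comp_apply]
  rw [List.getElem?_eq_getElem (by omega), List.getD_eq_getElem _ _ (by omega)]

theorem rot1_eq (t : List Int) (ht : t ≠ []) :
    PySem.List.slice t (some 1) none ++ [PySem.List.pyGetD t 0 0] = t.rotate 1 := by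
  match t with
  | a :: as =>
    rw [PySem.List.slice_from_one, List.rotate_eq_drop_append_take (by simp)]
    simp [PySem.List.pyGetD_zero]

theorem iter_rot (t : List Int) (ht : t ≠ []) (N : Nat) :
    (List.range N).foldl (fun t _ => PySem.List.slice t (some 1) none ++ [PySem.List.pyGetD t 0 0]) t
      = t.rotate N := by
  induction N with
  | zero => simp
  | succ n ih =>
    rw [List.range_succ, List.foldl_append, ih, List.foldl_cons, List.foldl_nil,
      rot1_eq _ (fun h => ht (List.rotate_eq_nil_iff.mp h)), List.rotate_rotate]

theorem rotateA_eq (m : Int) (t : List Int) (ht : t.length = 256) :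
    rotateA t m = t.rotate m.toNat := by
  unfold rotateA
  simp only [List.map_id_fun', id]
  rw [if_neg (by omega), if_neg (by omega)]
  rw [PySem.List.pyRange_zero]
  rw [List.foldl_map]
  exact iter_rot t (by intro h; simp [h] at ht) m.toNat

theorem crev_rot (lB : List Int) (hlen : lB.length = 256) (p i : Int)
    (hp0 : 0 ≤ p) (hp : p < 256) (h1 : 1 ≤ i) (h2 : i ≤ 256) :
    ((lB.rotate p.toNat).take i.toNat).reverse ++ (lB.rotate p.toNat).drop i.toNat
      = ((PySem.List.pyRange 0 256 1).map (fun j =>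
          if PySem.Int.mod (j - p) 256 < i then
            PySem.List.pyGetD lB (PySem.Int.mod (2 * p + i - 1 - j) 256) 0
          else PySem.List.pyGetD lB j 0)).rotate p.toNat := by
  have hR : (lB.rotate p.toNat).length = 256 := by simp [hlen]
  have hCl : ((PySem.List.pyRange 0 256 1).map (fun j =>
          if PySem.Int.mod (j - p) 256 < i then
            PySem.List.pyGetD lB (PySem.Int.mod (2 * p + i - 1 - j) 256) 0
          else PySem.List.pyGetD lB j 0)).length = 256 := by
    simp [PySem.List.length_pyRange_one]
  apply List.ext_getElem
  · simp [hR]; omega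
  · intro k hk hk'
    have hk256 : k < 256 := by
      simp only [List.length_append, List.length_reverse, List.length_take, List.length_drop, hR] at hk; omega
    rw [List.getElem_rotate]
    simp only [hCl]
    have hJ : (k + p.toNat) % 256 < 256 := Nat.mod_lt _ (by norm_num)
    rw [List.getElem_map]
    rw [PySem.List.getElem_pyRange_one]
    have hplen : (List.take i.toNat (lB.rotate p.toNat)).reverse.length = i.toNat := by
      simp [hR]; omega
    have hjint : (((k + p.toNat) % 256 : Nat) : Int) = ((k : Int) + p) % 256 := by
      push_cast [Int.toNat_of_nonneg hp0]; rfl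
    have hmodpos : (0:Int) < 256 := by norm_num
    rw [PySem.Int.mod_eq_emod_of_pos hmodpos, PySem.Int.mod_eq_emod_of_pos hmodpos]
    have hcond : ((0 + ((k + p.toNat) % 256 : Nat) : Int) - p) % 256 < i ↔ (k < i.toNat) := by
      rw [zero_add, hjint]
      constructor <;> intro h <;> omega
    by_cases hki : k < i.toNat
    · rw [if_pos (hcond.mpr hki)]
      rw [List.getElem_append_left (by omega)]
      rw [List.getElem_reverse, List.getElem_take, List.getElem_rotate]
      rw [PySem.List.pyGetD_eq_getElem _ _ (by omega) (by rw [hlen]; omega)]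
      simp only [List.length_take, hR, hlen]
      congr 1
      omega
    · rw [if_neg (fun h => hki (hcond.mp h))]
      rw [List.getElem_append_right (by omega)]
      rw [List.getElem_drop, List.getElem_rotate]
      rw [PySem.List.pyGetD_eq_getElem _ _ (by omega) (by rw [hlen]; omega)]
      simp only [List.length_take, hR, hlen]
      congr 1
      omega

theorem step_rel (stA stB : List Int × Int × Int) (i : Int) (h1 : 1 ≤ i) (h2 : i ≤ 256)
    (h : KnotRel stA stB) : KnotRel (stepA stA i) (stepB stB i) := by
  obtain ⟨lA, skipA, tot⟩ := stA
  obtain ⟨lB, pos, skipB⟩ := stB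
  obtain ⟨hlen, hpos0, hpos, hskip0, htot0, hskip, hposmod, hrot⟩ := h
  simp only at hlen hpos0 hpos hskip0 htot0 hskip hposmod hrot
  unfold stepA stepB
  simp only
  have hmodpos : (0:Int) < 256 := by norm_num
  have hlenA : lA.length = 256 := by rw [hrot]; simp [hlen]
  have hC : ∀ l' : List Int, ((PySem.List.pyRange 0 256 1).map (fun j =>
      if PySem.Int.mod (j - pos) 256 < i then
        PySem.List.pyGetD lB (PySem.Int.mod (2 * pos + i - 1 - j) 256) 0
      else PySem.List.pyGetD lB j 0)).length = 256 := by
    intro _; simp [PySem.List.length_pyRange_one]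
  refine ⟨by simpa using hC [], PySem.Int.mod_nonneg _ hmodpos, PySem.Int.mod_lt _ hmodpos,
    by simp; omega, by simp; omega, by simp [hskip], ?_, ?_⟩
  · simp only
    rw [hskip, hposmod]
    rw [PySem.Int.mod_eq_emod_of_pos hmodpos, PySem.Int.mod_eq_emod_of_pos hmodpos,
      PySem.Int.mod_eq_emod_of_pos hmodpos]
    omega
  · simp only
    rw [if_pos h2]
    rw [hrot, slice_rev _ i h1 (by simp [hlen]; omega),
      PySem.List.slice_from _ (by omega)]
    rw [crev_rot lB hlen pos i hpos0 hpos h1 h2]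
    rw [rotateA_eq _ _ (by simpa using hC [])]
    rw [List.rotate_rotate]
    rw [PySem.Int.mod_eq_emod_of_pos hmodpos]
    calc ((PySem.List.pyRange 0 256 1).map (fun j =>
          if PySem.Int.mod (j - pos) 256 < i then
            PySem.List.pyGetD lB (PySem.Int.mod (2 * pos + i - 1 - j) 256) 0
          else PySem.List.pyGetD lB j 0)).rotate (pos.toNat + (i + skipA).toNat)
        = ((PySem.List.pyRange 0 256 1).map (fun j =>
          if PySem.Int.mod (j - pos) 256 < i then
            PySem.List.pyGetD lB (PySem.Int.mod (2 * pos + i - 1 - j) 256) 0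
          else PySem.List.pyGetD lB j 0)).rotate ((pos.toNat + (i + skipA).toNat) %
            ((PySem.List.pyRange 0 256 1).map (fun j =>
          if PySem.Int.mod (j - pos) 256 < i then
            PySem.List.pyGetD lB (PySem.Int.mod (2 * pos + i - 1 - j) 256) 0
          else PySem.List.pyGetD lB j 0)).length) := (List.rotate_mod _ _).symm
      _ = _ := by rw [hC []]; congr 1; rw [hskip]; omega

theorem foldl_rel {α β γ : Type} (R : α → β → Prop) (P : γ → Prop)
    (fA : α → γ → α) (fB : β → γ → β) (xs : List γ) (hxs : ∀ x ∈ xs, P x)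
    (hstep : ∀ a b x, P x → R a b → R (fA a x) (fB b x)) :
    ∀ a b, R a b → R (xs.foldl fA a) (xs.foldl fB b) := by
  induction xs with
  | nil => intro a b h; exact h
  | cons x xs ih =>
    intro a b h
    exact ih (fun y hy => hxs y (List.mem_cons_of_mem _ hy))
      (fA a x) (fB b x) (hstep a b x (hxs x List.mem_cons_self) h)

-- the xor of the first t entries of block m, as A accumulates it
def blockXorT (l : List Int) (m t : Nat) : Int :=
  (List.range t).foldl (fun x j => PySem.Int.bxor x (PySem.List.pyGetD l ((16 * m + j : Nat) : Int) 0)) 0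

theorem truncdiv_natCast16 (n : Nat) : PySem.Int.truncdiv (n:Int) 16 = ((n/16 : Nat) : Int) := by
  unfold PySem.Int.truncdiv
  rw [Int.tdiv_eq_ediv_of_nonneg (by positivity)]
  push_cast; omega

theorem mod_natCast16 (n : Nat) : PySem.Int.mod (n:Int) 16 = ((n % 16 : Nat) : Int) := by
  rw [PySem.Int.mod_eq_emod_of_pos (by norm_num)]
  push_cast; omega

theorem hash_inner (l : List Int) (m : Nat) (hm : m < 16) :
    ∀ t, 1 ≤ t → t ≤ 16 →
    ((List.range t).map (fun j => ((16 * m + j : Nat) : Int))).foldl (fun out i =>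
      if PySem.Int.mod i 16 = 0 then
        PySem.List.pySetD out (PySem.Int.truncdiv i 16) (PySem.List.pyGetD l i 0)
      else
        PySem.List.pySetD out (PySem.Int.truncdiv i 16)
          (PySem.Int.bxor (PySem.List.pyGetD out (PySem.Int.truncdiv i 16) 0)
            (PySem.List.pyGetD l i 0)))
      ((List.range m).map (blockXorT l · 16) ++ List.replicate (16 - m) 0)
    = (List.range m).map (blockXorT l · 16) ++ [blockXorT l m t] ++ List.replicate (15 - m) 0 := by
  intro t
  induction t with
  | zero => omega
  | succ t ih =>
    intro _ ht16
    rw [List.range_succ, List.map_append, List.foldl_append]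
    by_cases ht : t = 0
    · subst ht
      simp only [List.range_zero, List.map_nil, List.foldl_nil, List.map_cons, List.foldl_cons]
      have hz : (16 - m) = (15 - m) + 1 := by omega
      rw [hz, List.replicate_succ]
      rw [if_pos (by rw [mod_natCast16]; push_cast; omega)]
      rw [truncdiv_natCast16, show (16 * m + 0) / 16 = m from by omega]
      rw [PySem.List.pySetD_natCast]
      rw [List.set_append, if_neg (by simp)]
      simp only [List.length_map, List.length_range, Nat.sub_self, List.set_cons_zero]
      rw [show blockXorT l m (0 + 1) = PySem.Int.bxor 0 (PySem.List.pyGetD l ((16 * m + 0 : Nat) : Int) 0) from by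
        simp [blockXorT]]
      rw [PySem.Int.bxor_comm, PySem.Int.bxor_zero]
      simp
    · rw [ih (by omega) (by omega)]
      simp only [List.map_cons, List.foldl_cons, List.map_nil, List.foldl_nil]
      rw [if_neg (by rw [mod_natCast16]; push_cast; omega)]
      rw [truncdiv_natCast16, show (16 * m + t) / 16 = m from by omega]
      rw [PySem.List.pySetD_natCast, PySem.List.pyGetD_natCast]
      rw [List.append_assoc]
      rw [List.getD_append_right _ _ _ _ (by simp)]
      simp only [List.length_map, List.length_range, Nat.sub_self]
      rw [List.set_append, if_neg (by simp)]
      simp only [List.length_map, List.length_range, Nat.sub_self]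
      rw [List.set_append, if_pos (by simp)]
      simp [blockXorT, List.range_succ]

theorem hash_outer (l : List Int) : ∀ m, m ≤ 16 →
    ((List.range (16 * m)).map (fun (k : Nat) => (k : Int))).foldl (fun out i =>
      if PySem.Int.mod i 16 = 0 then
        PySem.List.pySetD out (PySem.Int.truncdiv i 16) (PySem.List.pyGetD l i 0)
      else
        PySem.List.pySetD out (PySem.Int.truncdiv i 16)
          (PySem.Int.bxor (PySem.List.pyGetD out (PySem.Int.truncdiv i 16) 0)
            (PySem.List.pyGetD l i 0)))
      [0,0,0,0,0,0,0,0,0,0,0,0,0,0,0,0]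
    = (List.range m).map (blockXorT l · 16) ++ List.replicate (16 - m) 0 := by
  intro m
  induction m with
  | zero => intro _; rfl
  | succ m ih =>
    intro hm
    rw [show 16 * (m + 1) = 16 * m + 16 from by ring, List.range_add, List.map_append,
      List.foldl_append, ih (by omega), List.map_map]
    have := hash_inner l m (by omega) 16 (by omega) (by omega)
    rw [show ((fun (k : Nat) => (k : Int)) ∘ fun x => 16 * m + x)
        = (fun j => ((16 * m + j : Nat) : Int)) from funext fun j => rfl]
    rw [this]
    rw [List.range_succ, List.map_append, List.append_assoc]
    simp [show 16 - (m+1) = 15 - m from by omega]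

theorem hashAB_eq (l : List Int) : hashA l = hashB l := by
  unfold hashA hashB
  rw [PySem.List.pyRange_zero 256]
  rw [show ((256:Int).toNat) = 16 * 16 from rfl]
  rw [hash_outer l 16 (by omega)]
  rw [PySem.List.foldl_append_singleton_eq_map (fun (b : Int) =>
    (PySem.List.pyRange 0 16 1).foldl
      (fun x j => PySem.Int.bxor x (PySem.List.pyGetD l (16 * b + j) 0)) 0)]
  rw [PySem.List.pyRange_zero 16, show (Int.toNat 16) = 16 from rfl, List.map_map]
  simp only [Nat.sub_self, List.replicate_zero, List.append_nil, List.nil_append]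
  apply List.map_congr_left
  intro m hm
  simp only [Function.comp_apply]
  unfold blockXorT
  rw [List.foldl_map]
  apply PySem.List.foldl_congr_mem
  intro x j hj
  congr 1

-- ===== VERDICT (by name: the statement is the Claim_ definition above) =====
theorem solve_spec : Claim_equal_solve := by
  intro s hdom
  unfold Spec_solve
  simp only [solve, solve_alt]
  have hbound : ∀ i ∈ (s.toList.map (fun (c : Char) => ((c.toNat : Int))) ++ [17,31,73,47,23]),
      1 ≤ i ∧ i ≤ 256 := by
    intro i hi
    rcases List.mem_append.mp hi with h | h
    · obtain ⟨c, hc, rfl⟩ := List.mem_map.mp h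
      have hdc := List.all_eq_true.mp hdom c hc
      simp only [pvDomChar, Bool.or_eq_true, Bool.and_eq_true, decide_eq_true_eq,
        beq_iff_eq] at hdc
      omega
    · simp only [List.mem_cons, List.not_mem_nil, or_false] at h
      rcases h with rfl | rfl | rfl | rfl | rfl <;> norm_num
  have hinit : KnotRel ((PySem.List.pyRange 0 256 1).map (fun x => x), 0, 0)
      (PySem.List.pyRange 0 256 1, 0, 0) := by
    refine ⟨by simp [PySem.List.length_pyRange_one], by norm_num, by norm_num,
      le_refl _, le_refl _, rfl, by decide, by simp⟩
  have hrel := foldl_rel KnotRel (fun _ => True)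
    (fun st _ => (s.toList.map (fun (c : Char) => ((c.toNat : Int))) ++ [17,31,73,47,23]).foldl stepA st)
    (fun st _ => (s.toList.map (fun (c : Char) => ((c.toNat : Int))) ++ [17,31,73,47,23]).foldl stepB st)
    (PySem.List.pyRange 0 64 1) (fun _ _ => trivial)
    (fun a b x _ hr => foldl_rel KnotRel (fun i => 1 ≤ i ∧ i ≤ 256) stepA stepB
      _ hbound (fun a b i hi hr => step_rel a b i hi.1 hi.2 hr) a b hr)
    _ _ hinit
  set stA := (PySem.List.pyRange 0 64 1).foldl
    (fun st _ => (s.toList.map (fun (c : Char) => ((c.toNat : Int))) ++ [17,31,73,47,23]).foldl stepA st)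
    ((PySem.List.pyRange 0 256 1).map (fun x => x), 0, 0) with hstA
  set stB := (PySem.List.pyRange 0 64 1).foldl
    (fun st _ => (s.toList.map (fun (c : Char) => ((c.toNat : Int))) ++ [17,31,73,47,23]).foldl stepB st)
    (PySem.List.pyRange 0 256 1, 0, 0) with hstB
  obtain ⟨hlen, hpos0, hpos, hskip0, htot0, hskip, hposmod, hrot⟩ := hrel
  have hmodpos : (0:Int) < 256 := by norm_num
  have hm0 : 0 ≤ PySem.Int.mod stA.2.2 256 := PySem.Int.mod_nonneg _ hmodpos
  have hm1 : PySem.Int.mod stA.2.2 256 < 256 := PySem.Int.mod_lt _ hmodpos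
  have hl : rotateA stA.1 (256 - PySem.Int.mod stA.2.2 256) = stB.1 := by
    rw [hrot, rotateA_eq _ _ (by simp [hlen]), List.rotate_rotate]
    rw [show stB.2.1.toNat + (256 - PySem.Int.mod stA.2.2 256).toNat = 256 from by
      rw [hposmod]; omega]
    rw [show (256:Nat) = stB.1.length from hlen.symm, List.rotate_length]
  rw [hl, hashAB_eq]
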